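-- pv_equiv track=rewrite | github.com/vaibhavbhale/Python-program | 78_find_subarray_sum_equ_0.py | subarray_sum_zero
-- ===== SOURCE A (Python) =====
-- def subarray_sum_zero(arr):
--     n=len(arr)
--
--     for i in range (n):
--         sum=0
--         for j in range(i,n):
--             sum+=arr[j]
--             if sum==0:
--               return arr[i:j+1]#return the subarray
--     return None
-- ===== SOURCE B (Python) =====
-- def subarray_sum_zero(arr):
--     # Prefix-sum hash map: first occurrence of each prefix sum; a zero-sum
--     # subarray arr[p:q] exists iff prefix[p] == prefix[q]. Scan q once, keep
--     # the lexicographically smallest (p, q). O(n) instead of O(n^2).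
--     first = {0: 0}
--     best = None  # (p, q)
--     s = 0
--     for q, x in enumerate(arr, 1):
--         s += x
--         p = first.get(s)
--         if p is None:
--             first[s] = q
--         elif best is None or p < best[0]:
--             best = (p, q)
--     if best is None:
--         return None
--     return arr[best[0]:best[1]]
-- ===== Notes on version B (the rewrite author's own statement) =====
-- stated objective: faster
-- what changed: Replaces the O(n^2) nested start/end scan by a single pass over prefix sums with a hash map of first occurrences, keeping the lexicographically smallest (start,end) pair.
import Mathlib
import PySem

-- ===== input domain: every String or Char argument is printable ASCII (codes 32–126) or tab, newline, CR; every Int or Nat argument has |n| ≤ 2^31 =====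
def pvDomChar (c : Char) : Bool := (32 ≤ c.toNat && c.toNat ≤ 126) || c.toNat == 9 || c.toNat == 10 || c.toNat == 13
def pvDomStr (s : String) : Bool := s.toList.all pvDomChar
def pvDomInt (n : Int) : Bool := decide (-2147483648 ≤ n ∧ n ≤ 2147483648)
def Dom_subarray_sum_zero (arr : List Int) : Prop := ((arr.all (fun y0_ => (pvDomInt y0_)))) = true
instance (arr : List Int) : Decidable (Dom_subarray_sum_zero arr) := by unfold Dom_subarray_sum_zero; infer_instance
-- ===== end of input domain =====

-- B replaces A's O(n^2) nested start/end scan by a single pass over prefix sums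
-- with a first-occurrence hash map (objective: faster, asymptotic).

-- ===== PORT A =====
-- inner loop: for j in range(i, n): sum += arr[j]; if sum == 0: return arr[i:j+1]
def pvAInner (arr : List Int) (i : Int) : List Int → Int → Option (List Int)
  | [], _ => none
  | j :: js, s =>
    let s' := s + PySem.List.pyGetD arr j 0   -- arr[j]; j is always in range here
    if s' = 0 then some (PySem.List.slice arr (some i) (some (j + 1)))
    else pvAInner arr i js s'

-- outer loop: for i in range(n): …
def pvAOuter (arr : List Int) : List Int → Option (List Int)
  | [] => none
  | i :: is' =>
    match pvAInner arr i (PySem.List.pyRange i (arr.length : Int) 1) 0 with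
    | some r => some r
    | none => pvAOuter arr is'

def subarray_sum_zero (arr : List Int) : Option (List Int) :=
  pvAOuter arr (PySem.List.pyRange 0 (arr.length : Int) 1)

-- ===== PORT B =====
-- for q, x in enumerate(arr, 1): s += x; p = first.get(s); …
def pvBGo (first : PySem.Dict Int Int) (best : Option (Int × Int)) (s : Int) :
    List (Int × Int) → Option (Int × Int)
  | [] => best
  | (q, x) :: rest =>
    let s' := s + x
    match first.get? s' with
    | none => pvBGo (first.insert s' q) best s' rest
    | some p =>
      match best with
      | none => pvBGo first (some (p, q)) s' rest
      | some b =>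
        if p < b.1 then pvBGo first (some (p, q)) s' rest
        else pvBGo first best s' rest

def subarray_sum_zero_alt (arr : List Int) : Option (List Int) :=
  match pvBGo (PySem.Dict.empty.insert 0 0) none 0 (PySem.List.enumerate arr 1) with
  | none => none
  | some b => some (PySem.List.slice arr (some b.1) (some b.2))

-- ===== PRECONDITION & SPEC =====
def Spec_subarray_sum_zero (arr : List Int) (out : Option (List Int)) : Prop := out = subarray_sum_zero_alt arr
instance (arr : List Int) (out : Option (List Int)) : Decidable (Spec_subarray_sum_zero arr out) := by unfold Spec_subarray_sum_zero; infer_instance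

-- ===== CLAIM (what is proved, stated in full; the proofs are below) =====
def Claim_equal_subarray_sum_zero : Prop := ∀ (arr : List Int), Dom_subarray_sum_zero arr → Spec_subarray_sum_zero arr (subarray_sum_zero arr)

-- ===== LEMMAS AND PROOFS =====

-- prefix sum of the first k elements
def pvPref (arr : List Int) (k : Nat) : Int := (arr.take k).sum

-- arr[p:q] is a zero-sum subarray (p < q ≤ n and equal prefix sums)
def pvGood (arr : List Int) (p q : Nat) : Prop :=
  p < q ∧ q ≤ arr.length ∧ pvPref arr p = pvPref arr q

-- the common result shape: the slice arr[p:q]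
def pvSliceF (arr : List Int) (pq : Nat × Nat) : List Int :=
  PySem.List.slice arr (some (pq.1 : Int)) (some (pq.2 : Int))

-- o is the lexicographically least zero-sum pair (or none if there is none)
def pvIsLexMin (arr : List Int) : Option (Nat × Nat) → Prop
  | none => ∀ p q, ¬ pvGood arr p q
  | some pq => pvGood arr pq.1 pq.2 ∧
      ∀ p q, pvGood arr p q → (pq.1 < p ∨ (pq.1 = p ∧ pq.2 ≤ q))

lemma pvPref_succ (arr : List Int) (k : Nat) (h : k < arr.length) :
    pvPref arr (k + 1) = pvPref arr k + arr.getD k 0 := by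
  have h1 : arr.take (k + 1) = arr.take k ++ [arr[k]] := by
    rw [List.take_add_one, List.getElem?_eq_getElem h]; rfl
  rw [pvPref, pvPref, h1, List.sum_append, List.getD_eq_getElem _ _ h]; simp

lemma pvLexMin_unique (arr : List Int) {o o' : Option (Nat × Nat)}
    (h : pvIsLexMin arr o) (h' : pvIsLexMin arr o') : o = o' := by
  match o, o' with
  | none, none => rfl
  | none, some pq => exact absurd h'.1 (h pq.1 pq.2)
  | some pq, none => exact absurd h.1 (h' pq.1 pq.2)
  | some pq, some pq' =>
    have h1 := h.2 pq'.1 pq'.2 h'.1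
    have h2 := h'.2 pq.1 pq.2 h.1
    have : pq.1 = pq'.1 ∧ pq.2 = pq'.2 := by omega
    simp [Prod.ext_iff, this.1, this.2]

-- first q in (j, n] with pvPref q = pvPref i
def pvFirstQ (arr : List Int) (i j : Nat) : Option Nat :=
  (List.range' (j + 1) (arr.length - j)).find? (fun q => decide (pvPref arr q = pvPref arr i))

-- A's answer pair starting the outer loop at i
def pvApair (arr : List Int) (i : Nat) : Option (Nat × Nat) :=
  (List.range' i (arr.length - i)).findSome?
    (fun p => (pvFirstQ arr p p).map (fun q => (p, q)))

lemma pvFirstQ_nil (arr : List Int) (i j : Nat) (h : arr.length ≤ j) :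
    pvFirstQ arr i j = none := by
  simp [pvFirstQ, Nat.sub_eq_zero_of_le h]

lemma pvFirstQ_step (arr : List Int) (i j : Nat) (h : j < arr.length) :
    pvFirstQ arr i j =
      if pvPref arr (j + 1) = pvPref arr i then some (j + 1) else pvFirstQ arr i (j + 1) := by
  have h1 : arr.length - j = (arr.length - (j + 1)) + 1 := by omega
  rw [pvFirstQ, h1, List.range'_succ, List.find?_cons]
  split_ifs with hp
  · simp [hp]
  · simp [hp, pvFirstQ]

lemma pvAInner_eq (arr : List Int) (i : Nat) :
    ∀ (m j : Nat), j + m = arr.length →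
    pvAInner arr (i : Int) (PySem.List.pyRange (j : Int) (arr.length : Int) 1)
        (pvPref arr j - pvPref arr i)
      = (pvFirstQ arr i j).map (fun q => pvSliceF arr (i, q)) := by
  intro m
  induction m with
  | zero =>
    intro j hj
    rw [PySem.List.pyRange_one_eq_nil (by omega), pvFirstQ_nil arr i j (by omega)]
    rfl
  | succ m ih =>
    intro j hj
    have hjn : j < arr.length := by omega
    rw [PySem.List.pyRange_one_cons (by exact_mod_cast hjn)]
    rw [pvFirstQ_step arr i j hjn]
    show (if pvPref arr j - pvPref arr i + PySem.List.pyGetD arr (j : Int) 0 = 0 then _ else _) = _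
    rw [PySem.List.pyGetD_natCast]
    have hs : pvPref arr j - pvPref arr i + arr.getD j 0 = pvPref arr (j + 1) - pvPref arr i := by
      rw [pvPref_succ arr j hjn]; ring
    rw [hs]
    by_cases hp : pvPref arr (j + 1) = pvPref arr i
    · simp only [hp, sub_self]
      simp [pvSliceF]
    · have hne : pvPref arr (j + 1) - pvPref arr i ≠ 0 := by
        intro h0; exact hp (by linarith [sub_eq_zero.mp h0])
      rw [if_neg hne, if_neg hp]
      have : ((j : Int) + 1) = ((j + 1 : Nat) : Int) := by push_cast; ring
      rw [this]
      exact ih (j + 1) (by omega)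

lemma pvAOuter_eq (arr : List Int) :
    ∀ (m i : Nat), i + m = arr.length →
    pvAOuter arr (PySem.List.pyRange (i : Int) (arr.length : Int) 1)
      = (pvApair arr i).map (pvSliceF arr) := by
  intro m
  induction m with
  | zero =>
    intro i hi
    rw [PySem.List.pyRange_one_eq_nil (by omega)]
    simp [pvAOuter, pvApair, Nat.sub_eq_zero_of_le (by omega : arr.length ≤ i)]
  | succ m ih =>
    intro i hi
    have hin : i < arr.length := by omega
    rw [PySem.List.pyRange_one_cons (by exact_mod_cast hin)]
    show (match pvAInner arr (i : Int) (PySem.List.pyRange (i : Int) (arr.length : Int) 1) 0 with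
      | some r => some r
      | none => pvAOuter arr (PySem.List.pyRange ((i : Int) + 1) (arr.length : Int) 1)) = _
    have h0 : (0 : Int) = pvPref arr i - pvPref arr i := by ring
    rw [h0, pvAInner_eq arr i (arr.length - i) i (by omega)]
    have hr : arr.length - i = (arr.length - (i + 1)) + 1 := by omega
    rw [pvApair, hr, List.range'_succ, List.findSome?_cons]
    cases hq : pvFirstQ arr i i with
    | some q => simp
    | none =>
      simp only [Option.map_none]
      have : ((i : Int) + 1) = ((i + 1 : Nat) : Int) := by push_cast; ring
      rw [this, ih (i + 1) (by omega)]
      rfl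

lemma pvFirstQ_none (arr : List Int) (i : Nat) :
    ∀ (m j : Nat), j + m = arr.length → pvFirstQ arr i j = none →
    ∀ q, j < q → q ≤ arr.length → pvPref arr q ≠ pvPref arr i := by
  intro m
  induction m with
  | zero => intro j hj _ q hq1 hq2; omega
  | succ m ih =>
    intro j hj hnone q hq1 hq2
    rw [pvFirstQ_step arr i j (by omega)] at hnone
    split_ifs at hnone with hp
    rcases Nat.eq_or_lt_of_le (Nat.succ_le_of_lt hq1) with h | h
    · rw [← h]; exact hp
    · exact ih (j + 1) (by omega) hnone q h hq2

lemma pvFirstQ_some (arr : List Int) (i : Nat) :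
    ∀ (m j : Nat), j + m = arr.length → ∀ q, pvFirstQ arr i j = some q →
    (j < q ∧ q ≤ arr.length ∧ pvPref arr q = pvPref arr i) ∧
    ∀ q', j < q' → q' ≤ arr.length → pvPref arr q' = pvPref arr i → q ≤ q' := by
  intro m
  induction m with
  | zero =>
    intro j hj q hsome
    rw [pvFirstQ_nil arr i j (by omega)] at hsome
    exact absurd hsome (by simp)
  | succ m ih =>
    intro j hj q hsome
    rw [pvFirstQ_step arr i j (by omega)] at hsome
    split_ifs at hsome with hp
    · obtain rfl : j + 1 = q := by exact Option.some_injective _ hsome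
      exact ⟨⟨by omega, by omega, hp⟩, fun q' hq1 _ _ => by omega⟩
    · obtain ⟨⟨h1, h2, h3⟩, hmin⟩ := ih (j + 1) (by omega) q hsome
      refine ⟨⟨by omega, h2, h3⟩, fun q' hq1 hq2 hq3 => ?_⟩
      rcases Nat.eq_or_lt_of_le (Nat.succ_le_of_lt hq1) with h | h
      · rw [← h] at hq3; exact absurd hq3 hp
      · exact hmin q' h hq2 hq3

lemma pvApair_nil (arr : List Int) (i : Nat) (h : arr.length ≤ i) :
    pvApair arr i = none := by
  simp [pvApair, Nat.sub_eq_zero_of_le h]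

lemma pvApair_step (arr : List Int) (i : Nat) (h : i < arr.length) :
    pvApair arr i = match pvFirstQ arr i i with
      | some q => some (i, q)
      | none => pvApair arr (i + 1) := by
  have hr : arr.length - i = (arr.length - (i + 1)) + 1 := by omega
  rw [pvApair, hr, List.range'_succ, List.findSome?_cons]
  cases hq : pvFirstQ arr i i with
  | some q => simp
  | none => simp [pvApair]

-- apair from i is the lex-min among pairs whose start is ≥ i
def pvLexMinFrom (arr : List Int) (i : Nat) : Option (Nat × Nat) → Prop
  | none => ∀ p q, i ≤ p → ¬ pvGood arr p q
  | some pq => pvGood arr pq.1 pq.2 ∧ i ≤ pq.1 ∧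
      ∀ p q, pvGood arr p q → i ≤ p → (pq.1 < p ∨ (pq.1 = p ∧ pq.2 ≤ q))

lemma pvApair_min (arr : List Int) :
    ∀ (m i : Nat), i + m = arr.length → pvLexMinFrom arr i (pvApair arr i) := by
  intro m
  induction m with
  | zero =>
    intro i hi
    rw [pvApair_nil arr i (by omega)]
    intro p q hp hg
    rcases hg with ⟨h1, h2, _⟩
    omega
  | succ m ih =>
    intro i hi
    rw [pvApair_step arr i (by omega)]
    cases hq : pvFirstQ arr i i with
    | some q =>
      obtain ⟨⟨h1, h2, h3⟩, hmin⟩ := pvFirstQ_some arr i (arr.length - i) i (by omega) q hq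
      refine ⟨⟨h1, h2, h3.symm⟩, le_refl i, fun p' q' hg hip => ?_⟩
      rcases Nat.eq_or_lt_of_le hip with h | h
      · exact Or.inr ⟨h, hmin q' (h ▸ hg.1) hg.2.1 (h ▸ hg.2.2.symm)⟩
      · exact Or.inl h
    | none =>
      have hnone := pvFirstQ_none arr i (arr.length - i) i (by omega) hq
      have hi1 := ih (i + 1) (by omega)
      have hnoti : ∀ q', ¬ pvGood arr i q' := by
        intro q' hg
        exact hnone q' hg.1 hg.2.1 hg.2.2.symm
      cases hap : pvApair arr (i + 1) with
      | none =>
        rw [hap] at hi1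
        intro p q hip hg
        rcases Nat.eq_or_lt_of_le hip with h | h
        · exact hnoti q (h ▸ hg)
        · exact hi1 p q h hg
      | some pq =>
        rw [hap] at hi1
        obtain ⟨hg0, hge, hmin⟩ := hi1
        refine ⟨hg0, by omega, fun p' q' hg hip => ?_⟩
        rcases Nat.eq_or_lt_of_le hip with h | h
        · exact absurd (h ▸ hg) (hnoti q')
        · exact hmin p' q' hg h

lemma pvA_is (arr : List Int) :
    ∃ o, pvIsLexMin arr o ∧ subarray_sum_zero arr = o.map (pvSliceF arr) := by
  refine ⟨pvApair arr 0, ?_, ?_⟩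
  · have h := pvApair_min arr arr.length 0 (by omega)
    cases hap : pvApair arr 0 with
    | none =>
      rw [hap] at h
      exact fun p q => h p q (Nat.zero_le p)
    | some pq =>
      rw [hap] at h
      exact ⟨h.1, fun p q hg => h.2.2 p q hg (Nat.zero_le p)⟩
  · have h0 : ((0 : Nat) : Int) = (0 : Int) := rfl
    rw [subarray_sum_zero, ← h0, pvAOuter_eq arr arr.length 0 (by omega)]

-- dictionary invariant: first.get? v is the least k ≤ Q with pvPref k = v
def pvDInv (arr : List Int) (Q : Nat) (d : PySem.Dict Int Int) : Prop :=
  ∀ v : Int,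
    (∀ j, d.get? v = some j → ∃ k : Nat, j = (k : Int) ∧ k ≤ Q ∧ pvPref arr k = v ∧
        ∀ k', k' ≤ Q → pvPref arr k' = v → k ≤ k') ∧
    (d.get? v = none → ∀ k, k ≤ Q → pvPref arr k ≠ v)

-- best invariant: b is the lex-min pair among those with end ≤ Q
def pvBInv (arr : List Int) (Q : Nat) : Option (Int × Int) → Prop
  | none => ∀ p q, q ≤ Q → ¬ pvGood arr p q
  | some pr => ∃ p q : Nat, pr = ((p : Int), (q : Int)) ∧ pvGood arr p q ∧ q ≤ Q ∧
      ∀ p' q', pvGood arr p' q' → q' ≤ Q → (p < p' ∨ (p = p' ∧ q ≤ q'))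

lemma pvGood_end (arr : List Int) (Q p : Nat) (hQn : Q < arr.length) :
    pvGood arr p (Q + 1) ↔ p ≤ Q ∧ pvPref arr p = pvPref arr (Q + 1) := by
  unfold pvGood
  constructor
  · rintro ⟨h1, _, h3⟩; exact ⟨by omega, h3⟩
  · rintro ⟨h1, h2⟩; exact ⟨by omega, by omega, h2⟩

lemma pvDInv_insert (arr : List Int) (Q : Nat) (_hQn : Q < arr.length)
    (d : PySem.Dict Int Int) (hd : pvDInv arr Q d)
    (hnone : d.get? (pvPref arr (Q + 1)) = none) :
    pvDInv arr (Q + 1) (d.insert (pvPref arr (Q + 1)) ((Q : Int) + 1)) := by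
  intro v
  constructor
  · intro j hj
    rw [PySem.Dict.get?_insert] at hj
    split_ifs at hj with hv
    · obtain rfl : ((Q : Int) + 1) = j := by exact Option.some_injective _ hj
      refine ⟨Q + 1, by push_cast; ring, le_refl _, by rw [hv], fun k' hk' hpk' => ?_⟩
      rcases Nat.lt_or_ge k' (Q + 1) with h | h
      · rw [hv] at hpk'
        exact absurd hpk' ((hd _).2 hnone k' (by omega))
      · omega
    · obtain ⟨k, hk1, hk2, hk3, hk4⟩ := (hd v).1 j hj
      refine ⟨k, hk1, by omega, hk3, fun k' hk' hpk' => ?_⟩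
      rcases Nat.lt_or_ge k' (Q + 1) with h | h
      · exact hk4 k' (by omega) hpk'
      · obtain rfl : k' = Q + 1 := by omega
        exact absurd hpk'.symm hv
  · intro hn k hk hpk
    rw [PySem.Dict.get?_insert] at hn
    split_ifs at hn with hv
    rcases Nat.lt_or_ge k (Q + 1) with h | h
    · exact (hd v).2 hn k (by omega) hpk
    · obtain rfl : k = Q + 1 := by omega
      exact hv hpk.symm

lemma pvDInv_keep (arr : List Int) (Q : Nat) (_hQn : Q < arr.length)
    (d : PySem.Dict Int Int) (hd : pvDInv arr Q d) (j : Int)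
    (hsome : d.get? (pvPref arr (Q + 1)) = some j) :
    pvDInv arr (Q + 1) d := by
  intro v
  constructor
  · intro j' hj'
    obtain ⟨k, hk1, hk2, hk3, hk4⟩ := (hd v).1 j' hj'
    exact ⟨k, hk1, by omega, hk3, fun k' hk' hpk' => by
      rcases Nat.lt_or_ge k' (Q + 1) with h | h
      · exact hk4 k' (by omega) hpk'
      · omega⟩
  · intro hn k hk hpk
    rcases Nat.lt_or_ge k (Q + 1) with h | h
    · exact (hd v).2 hn k (by omega) hpk
    · obtain rfl : k = Q + 1 := by omega
      rw [← hpk] at hn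
      rw [hn] at hsome
      simp at hsome

lemma pvBInv_nonew (arr : List Int) (Q : Nat) (b : Option (Int × Int))
    (hb : pvBInv arr Q b) (hno : ∀ p, ¬ pvGood arr p (Q + 1)) :
    pvBInv arr (Q + 1) b := by
  cases b with
  | none =>
    intro p q hq hg
    rcases Nat.lt_or_ge q (Q + 1) with h | h
    · exact hb p q (by omega) hg
    · obtain rfl : q = Q + 1 := by omega
      exact hno p hg
  | some pr =>
    obtain ⟨p0, q0, hpr, hg0, hq0, hmin⟩ := hb
    refine ⟨p0, q0, hpr, hg0, by omega, fun p' q' hg hq' => ?_⟩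
    rcases Nat.lt_or_ge q' (Q + 1) with h | h
    · exact hmin p' q' hg (by omega)
    · obtain rfl : q' = Q + 1 := by omega
      exact absurd hg (hno p')

lemma pvBGo_inv (arr : List Int) :
    ∀ (m Q : Nat) (d : PySem.Dict Int Int) (b : Option (Int × Int)),
    Q + m = arr.length → pvDInv arr Q d → pvBInv arr Q b →
    pvBInv arr arr.length
      (pvBGo d b (pvPref arr Q) (PySem.List.enumerate (arr.drop Q) ((Q : Int) + 1))) := by
  intro m
  induction m with
  | zero =>
    intro Q d b hQ hd hb
    obtain rfl : Q = arr.length := by omega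
    rw [List.drop_length, PySem.List.enumerate_nil]
    exact hb
  | succ m ih =>
    intro Q d b hQ hd hb
    have hQn : Q < arr.length := by omega
    rw [List.drop_eq_getElem_cons hQn, PySem.List.enumerate_cons]
    have hs : pvPref arr Q + arr[Q] = pvPref arr (Q + 1) := by
      rw [pvPref_succ arr Q hQn, List.getD_eq_getElem _ _ hQn]
    have hcast : ((Q : Int) + 1 + 1) = (((Q + 1 : Nat) : Int) + 1) := by push_cast; ring
    simp only [pvBGo]
    rw [hs, hcast]
    cases hget : d.get? (pvPref arr (Q + 1)) with
    | none =>
      have hno : ∀ p, ¬ pvGood arr p (Q + 1) := by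
        intro p hg
        obtain ⟨hp1, hp2⟩ := (pvGood_end arr Q p hQn).mp hg
        exact (hd _).2 hget p hp1 hp2
      exact ih (Q + 1) _ b (by omega) (pvDInv_insert arr Q hQn d hd hget) (pvBInv_nonew arr Q b hb hno)
    | some j =>
      obtain ⟨k, rfl, hkQ, hkpref, hkmin⟩ := (hd _).1 j hget
      have hd' := pvDInv_keep arr Q hQn d hd _ hget
      have hgk : pvGood arr k (Q + 1) := ⟨by omega, by omega, hkpref⟩
      have hpmin : ∀ p', pvGood arr p' (Q + 1) → k ≤ p' := by
        intro p' hg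
        obtain ⟨hp1, hp2⟩ := (pvGood_end arr Q p' hQn).mp hg
        exact hkmin p' hp1 hp2
      cases b with
      | none =>
        have hb' : pvBInv arr (Q + 1) (some ((k : Int), ((Q + 1 : Nat) : Int))) := by
          refine ⟨k, Q + 1, rfl, hgk, le_refl _, fun p' q' hg hq' => ?_⟩
          rcases Nat.lt_or_ge q' (Q + 1) with h | h
          · exact absurd hg (hb p' q' (by omega))
          · obtain rfl : q' = Q + 1 := by omega
            have := hpmin p' hg
            omega
        have : ((Q : Int) + 1) = ((Q + 1 : Nat) : Int) := by push_cast; ring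
        rw [this]
        exact ih (Q + 1) d _ (by omega) hd' hb'
      | some bb =>
        obtain ⟨p0, q0, rfl, hg0, hq0, hmin⟩ := hb
        show pvBInv arr arr.length
          (if (k : Int) < (p0 : Int) then _ else _)
        by_cases hk : k < p0
        · rw [if_pos (by exact_mod_cast hk)]
          have hb' : pvBInv arr (Q + 1) (some ((k : Int), ((Q + 1 : Nat) : Int))) := by
            refine ⟨k, Q + 1, rfl, hgk, le_refl _, fun p' q' hg hq' => ?_⟩
            rcases Nat.lt_or_ge q' (Q + 1) with h | h
            · have := hmin p' q' hg (by omega)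
              omega
            · obtain rfl : q' = Q + 1 := by omega
              have := hpmin p' hg
              omega
          have : ((Q : Int) + 1) = ((Q + 1 : Nat) : Int) := by push_cast; ring
          rw [this]
          exact ih (Q + 1) d _ (by omega) hd' hb'
        · rw [if_neg (by exact_mod_cast hk)]
          have hb' : pvBInv arr (Q + 1) (some ((p0 : Int), (q0 : Int))) := by
            refine ⟨p0, q0, rfl, hg0, by omega, fun p' q' hg hq' => ?_⟩
            rcases Nat.lt_or_ge q' (Q + 1) with h | h
            · exact hmin p' q' hg (by omega)
            · obtain rfl : q' = Q + 1 := by omega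
              have h1 := hpmin p' hg
              omega
          exact ih (Q + 1) d _ (by omega) hd' hb'

lemma pvB_is (arr : List Int) :
    ∃ o, pvIsLexMin arr o ∧ subarray_sum_zero_alt arr = o.map (pvSliceF arr) := by
  have hd0 : pvDInv arr 0 (PySem.Dict.empty.insert 0 0) := by
    intro v
    constructor
    · intro j hj
      rw [PySem.Dict.get?_insert] at hj
      split_ifs at hj with hv
      · obtain rfl : (0 : Int) = j := Option.some_injective _ hj
        exact ⟨0, rfl, le_refl _, by simp [pvPref, hv], fun k' hk' _ => by omega⟩
      · rw [PySem.Dict.get?_empty] at hj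
        exact absurd hj (by simp)
    · intro hn k hk hpk
      rw [PySem.Dict.get?_insert] at hn
      split_ifs at hn with hv
      obtain rfl : k = 0 := by omega
      exact hv (by simpa [pvPref] using hpk.symm)
  have hb0 : pvBInv arr 0 none := by
    intro p q hq hg
    rcases hg with ⟨h1, _, _⟩
    omega
  have h := pvBGo_inv arr arr.length 0 (PySem.Dict.empty.insert 0 0) none (by omega) hd0 hb0
  have hz : pvPref arr 0 = 0 := by simp [pvPref]
  have h1 : ((0 : Nat) : Int) + 1 = 1 := by norm_num
  rw [hz, List.drop_zero, h1] at h
  unfold subarray_sum_zero_alt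
  cases hres : pvBGo (PySem.Dict.empty.insert 0 0) none 0 (PySem.List.enumerate arr 1) with
  | none =>
    rw [hres] at h
    exact ⟨none, fun p q hg => h p q hg.2.1 hg, rfl⟩
  | some pr =>
    rw [hres] at h
    obtain ⟨p, q, rfl, hg, hq, hmin⟩ := h
    exact ⟨some (p, q), ⟨hg, fun p' q' hg' => hmin p' q' hg' hg'.2.1⟩, rfl⟩

-- ===== VERDICT (by name: the statement is the Claim_ definition above) =====
theorem subarray_sum_zero_spec : Claim_equal_subarray_sum_zero := by
  intro arr _
  unfold Spec_subarray_sum_zero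
  obtain ⟨o, ho, ha⟩ := pvA_is arr
  obtain ⟨o', ho', hb⟩ := pvB_is arr
  rw [ha, hb, pvLexMin_unique arr ho ho']
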